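-- pv_equiv track=rewrite | github.com/Alvorecer721/Multi-lingual-Picture-Book-Reader | utils/text.py | get_count_list
-- ===== SOURCE A (Python) =====
-- from collections import deque
--
-- def count_greater(d):
--     """
--     count how many elements in the target list is the greatest among all lists
--     :param d: dequeued list
--     :return: count
--     """
--     numElement = len(d)
--     minLength = len(min(d, key=len))
--     count = 0
--
--     for i in range(minLength):
--         if all_greater(i, numElement, d):
--             count += 1
--
--     return count
--
-- def all_greater(n, m, d):
--     """
--     check whether the specified element is the greatest
--     :param n: number of lists in the dequeued list
--     :param m: length of shortest list in the dequeued list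
--     :param d: dequeued list
--     :return: true or false
--     """
--     flag = True
--     for i in range(1, m):
--         if d[0][n] < d[i][n]:
--             flag = False
--
--     return flag
--
-- def get_count_list(listOfList):
--     """
--     rotate the list in the list of list to get count for each list
--     :param listOfList: data takes in
--     :return: a list with each count for each list in the list of list
--     """
--     d = deque(listOfList)
--     numElement = len(d)
--
--     counts = []
--
--     for c in range(numElement):
--         counts.append(count_greater(d))
--         d.rotate(-1)
--     return counts
-- ===== SOURCE B (Python) =====
-- def get_count_list(listOfList):
--     lists = list(listOfList)
--     if not lists:
--         return []
--     minLength = min(len(l) for l in lists)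
--     counts = [0] * len(lists)
--     for col in range(minLength):
--         column = [l[col] for l in lists]
--         m = max(column)
--         counts = [c + (v == m) for c, v in zip(counts, column)]
--     return counts
-- ===== Notes on version B (the rewrite author's own statement) =====
-- stated objective: simpler
-- what changed: B drops A's deque rotation and per-rotation re-scan (count_greater/all_greater over every rotated copy): it loops over columns once, takes each column's max, and distributes 0/1 increments into one shared counts accumulator via zip.
import Mathlib
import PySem

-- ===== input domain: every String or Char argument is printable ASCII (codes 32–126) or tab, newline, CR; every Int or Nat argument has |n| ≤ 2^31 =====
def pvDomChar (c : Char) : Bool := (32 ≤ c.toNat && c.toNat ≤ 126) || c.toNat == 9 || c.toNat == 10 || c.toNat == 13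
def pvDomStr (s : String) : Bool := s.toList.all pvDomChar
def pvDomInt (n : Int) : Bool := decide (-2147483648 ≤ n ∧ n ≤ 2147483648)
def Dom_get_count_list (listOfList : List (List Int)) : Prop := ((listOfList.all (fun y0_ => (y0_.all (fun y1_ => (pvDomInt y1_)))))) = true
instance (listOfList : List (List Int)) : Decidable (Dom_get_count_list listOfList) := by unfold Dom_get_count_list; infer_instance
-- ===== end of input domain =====

-- B replaces A's deque rotation + full re-scan per rotation by a single column-outer
-- pass accumulating per-list counts (objective: simpler / asymptotically fewer scans).

-- ===== PORT A =====

-- all_greater(n, m, d): flag loop over i in range(1, m)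
def all_greater_py (n : Int) (m : Int) (d : List (List Int)) : Bool :=
  (PySem.List.pyRange 1 m 1).foldl
    (fun flag i =>
      if PySem.List.pyGetD (PySem.List.pyGetD d 0 []) n 0 <
         PySem.List.pyGetD (PySem.List.pyGetD d i []) n 0 then false else flag)
    true

-- count_greater(d): minLength = len(min(d, key=len)); count over range(minLength)
-- (min() raises on an empty d; inside get_count_list d is never empty, the 'none' arm is unreachable)
def count_greater_py (d : List (List Int)) : Int :=
  let numElement : Int := PySem.List.len d
  let minLength : Int :=
    match PySem.List.min? d (fun l => (l.length : Int)) with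
    | some l => (l.length : Int)
    | none => 0
  (PySem.List.pyRange 0 minLength 1).foldl
    (fun count i => if all_greater_py i numElement d then count + 1 else count) 0

-- get_count_list: deque, rotate(-1) after each append
def get_count_list (listOfList : List (List Int)) : List Int :=
  let numElement : Int := PySem.List.len listOfList
  ((PySem.List.pyRange 0 numElement 1).foldl
    (fun (st : List (List Int) × List Int) _ =>
      (st.1.drop 1 ++ st.1.take 1, st.2 ++ [count_greater_py st.1]))
    (listOfList, [])).2

-- ===== PORT B =====

def get_count_list_alt (listOfList : List (List Int)) : List Int :=
  if listOfList = [] then []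
  else
    let minLength : Int :=
      match PySem.List.min? (listOfList.map (fun l => (l.length : Int))) (fun x => x) with
      | some m => m
      | none => 0
    (PySem.List.pyRange 0 minLength 1).foldl
      (fun counts col =>
        let column := listOfList.map (fun l => PySem.List.pyGetD l col 0)
        let m := match PySem.List.max? column (fun x => x) with
                 | some m => m
                 | none => 0
        (counts.zip column).map (fun cv => cv.1 + (if cv.2 = m then 1 else 0)))
      (List.replicate listOfList.length 0)

-- ===== PRECONDITION & SPEC =====
def Spec_get_count_list (listOfList : List (List Int)) (out : List Int) : Prop := out = get_count_list_alt listOfList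
instance (listOfList : List (List Int)) (out : List Int) : Decidable (Spec_get_count_list listOfList out) := by unfold Spec_get_count_list; infer_instance

-- ===== CLAIM (what is proved, stated in full; the proofs are below) =====
def Claim_equal_get_count_list : Prop := ∀ (listOfList : List (List Int)), Dom_get_count_list listOfList → Spec_get_count_list listOfList (get_count_list listOfList)

-- ===== LEMMAS AND PROOFS =====

-- the common column predicate: list #c's entry at column `col` is ≥ every list's entry there
def pvP (L : List (List Int)) (c : Nat) (col : Int) : Bool :=
  decide (∀ l ∈ L, PySem.List.pyGetD l col 0 ≤ PySem.List.pyGetD (L.getD c []) col 0)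

-- "m is the minimum of the lengths of L"
def pvIsMinLen (L : List (List Int)) (m : Int) : Prop :=
  (∃ l ∈ L, (l.length : Int) = m) ∧ ∀ l ∈ L, m ≤ (l.length : Int)

theorem pvIsMinLen_unique {L : List (List Int)} {m₁ m₂ : Int}
    (h₁ : pvIsMinLen L m₁) (h₂ : pvIsMinLen L m₂) : m₁ = m₂ := by
  obtain ⟨⟨l₁, hl₁, e₁⟩, hmin₁⟩ := h₁
  obtain ⟨⟨l₂, hl₂, e₂⟩, hmin₂⟩ := h₂
  have := hmin₁ l₂ hl₂
  have := hmin₂ l₁ hl₁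
  omega

theorem pv_flag_foldl {α : Type} (p : α → Prop) [DecidablePred p] (xs : List α) (b : Bool) :
    xs.foldl (fun flag x => if p x then false else flag) b
      = (b && xs.all (fun x => !(decide (p x)))) := by
  induction xs generalizing b with
  | nil => simp
  | cons x t ih =>
      rw [List.foldl_cons, ih]
      by_cases h : p x <;> simp [h]

theorem pv_rot_eq (L : List (List Int)) (c : Nat) (h : c < L.length) :
    (L.drop c ++ L.take c).drop 1 ++ (L.drop c ++ L.take c).take 1
      = L.drop (c + 1) ++ L.take (c + 1) := by
  rw [List.drop_eq_getElem_cons h]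
  have h1 : (((L[c] :: L.drop (c+1)) ++ L.take c) : List (List Int)).drop 1
      = L.drop (c+1) ++ L.take c := rfl
  have h2 : (((L[c] :: L.drop (c+1)) ++ L.take c) : List (List Int)).take 1 = [L[c]] := rfl
  rw [h1, h2, List.append_assoc, List.take_add_one, List.getElem?_eq_getElem h]
  rfl

-- the state fold of get_count_list, generically
theorem pv_fold_rot {α : Type} (g : List (List Int) → Int) (xs : List α)
    (d : List (List Int)) (cs : List Int) :
    (xs.foldl (fun (st : List (List Int) × List Int) _ =>
        (st.1.drop 1 ++ st.1.take 1, st.2 ++ [g st.1])) (d, cs)).2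
      = cs ++ (List.range xs.length).map
          (fun j => g ((fun t => t.drop 1 ++ t.take 1)^[j] d)) := by
  induction xs generalizing d cs with
  | nil => simp
  | cons x t ih =>
      rw [List.foldl_cons, ih]
      simp [List.range_succ_eq_map, Function.iterate_succ_apply, List.map_map,
        Function.comp_def, List.append_assoc]

theorem pv_iterate_rot (L : List (List Int)) (c : Nat) (h : c ≤ L.length) :
    (fun t => t.drop 1 ++ t.take 1)^[c] L = L.drop c ++ L.take c := by
  induction c with
  | zero => simp
  | succ k ih =>
      have hk : k < L.length := by omega
      rw [Function.iterate_succ_apply', ih (by omega)]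
      exact pv_rot_eq L k hk

-- A's minLength for d satisfies pvIsMinLen d
theorem pv_minA (d : List (List Int)) (hd : d ≠ []) :
    pvIsMinLen d (match PySem.List.min? d (fun l => (l.length : Int)) with
                  | some l => (l.length : Int)
                  | none => 0) := by
  cases hmin : PySem.List.min? d (fun l => (l.length : Int)) with
  | none => exact absurd ((PySem.List.min?_eq_none_iff _ _).mp hmin) hd
  | some l =>
      exact ⟨⟨l, PySem.List.min?_mem hmin, rfl⟩, fun y hy => PySem.List.min?_isMin hmin y hy⟩

-- B's minLength satisfies pvIsMinLen L
theorem pv_minB (L : List (List Int)) (hL : L ≠ []) :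
    pvIsMinLen L (match PySem.List.min? (L.map (fun l => (l.length : Int))) (fun x => x) with
                  | some m => m
                  | none => 0) := by
  cases hmin : PySem.List.min? (L.map (fun l => (l.length : Int))) (fun x => x) with
  | none =>
      have := (PySem.List.min?_eq_none_iff _ _).mp hmin
      simp at this
      exact absurd this hL
  | some m =>
      have hmem := PySem.List.min?_mem hmin
      obtain ⟨l, hl, rfl⟩ := List.mem_map.mp hmem
      refine ⟨⟨l, hl, rfl⟩, fun y hy => ?_⟩
      exact PySem.List.min?_isMin hmin _ (List.mem_map_of_mem hy)

-- the per-rotation count of A equals countP of pvP, for any witness of the minimum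
theorem pv_count_greater_eq (L : List (List Int)) (c : Nat) (hc : c < L.length)
    (M : Int) (hM : pvIsMinLen L M) :
    count_greater_py (L.drop c ++ L.take c)
      = ((PySem.List.pyRange 0 M 1).countP (pvP L c) : Int) := by
  set d := L.drop c ++ L.take c with hd
  have hmemd : ∀ l, l ∈ d ↔ l ∈ L := by
    intro l
    rw [hd, List.mem_append, or_comm, ← List.mem_append, List.take_append_drop]
  have hdne : d ≠ [] := by
    intro h
    have : d.length = L.length := by simp [hd]; omega
    rw [h] at this
    simp at this
    omega
  have hdlen : d.length = L.length := by simp [hd]; omega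
  -- head of d is L[c]
  have hdc : d = L[c] :: (L.drop (c + 1) ++ L.take c) := by
    rw [hd, List.drop_eq_getElem_cons hc]; rfl
  have hminL : pvIsMinLen d (match PySem.List.min? d (fun l => (l.length : Int)) with
                  | some l => (l.length : Int)
                  | none => 0) := pv_minA d hdne
  have hMd : pvIsMinLen d M := ⟨by
      obtain ⟨l, hl, e⟩ := hM.1
      exact ⟨l, (hmemd l).mpr hl, e⟩,
    fun l hl => hM.2 l ((hmemd l).mp hl)⟩
  have hMeq : (match PySem.List.min? d (fun l => (l.length : Int)) with
                  | some l => (l.length : Int)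
                  | none => 0) = M := pvIsMinLen_unique hminL hMd
  unfold count_greater_py
  rw [hMeq]
  rw [PySem.List.foldl_if_add_one]
  rw [zero_add]
  congr 1
  apply List.countP_congr
  intro i _
  -- all_greater on d over range(1, len d) equals pvP L c i
  unfold all_greater_py
  have hlen : PySem.List.len d = (d.length : Int) := by simp
  rw [hlen]
  rw [PySem.List.foldl_pyRange_pyGetD' d ([] : List Int)
        (fun flag l => if PySem.List.pyGetD (PySem.List.pyGetD d 0 []) i 0 <
                              PySem.List.pyGetD l i 0 then false else flag)
        true (a := 1) (by omega)]
  rw [pv_flag_foldl (fun l => PySem.List.pyGetD (PySem.List.pyGetD d 0 []) i 0 <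
        PySem.List.pyGetD l i 0) (d.drop (Int.toNat 1)) true]
  have hhead : PySem.List.pyGetD d 0 [] = L[c] := by
    rw [hdc, PySem.List.pyGetD_zero_cons]
  have hgetD : L.getD c [] = L[c] := List.getD_eq_getElem L [] hc
  rw [Bool.true_and]
  unfold pvP
  rw [hgetD]
  simp only [hhead]
  rw [hdc]
  simp only [List.all_eq_true, Bool.not_eq_eq_eq_not, Bool.not_true,
    decide_eq_true_eq, Int.toNat_one, List.drop_one, List.tail_cons]
  constructor
  · intro h l hl
    have hl' : l ∈ L[c] :: (L.drop (c + 1) ++ L.take c) := by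
      rw [← hdc, hmemd]; exact hl
    rcases List.mem_cons.mp hl' with rfl | hmem
    · exact le_refl _
    · have := h l hmem
      simp at this
      omega
  · intro h l hl
    have hlL : l ∈ L := by
      rw [← hmemd, hdc]
      exact List.mem_cons_of_mem _ hl
    have := h l hlL
    simp
    omega

-- B's maximum test at index idx equals pvP L idx col
theorem pv_max_char (L : List (List Int)) (hL : L ≠ []) (col : Int) (idx : Nat)
    (hidx : idx < L.length) :
    (decide ((L.map (fun l => PySem.List.pyGetD l col 0))[idx]'(by simpa using hidx)
        = (match PySem.List.max? (L.map (fun l => PySem.List.pyGetD l col 0)) (fun x => x) with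
           | some m => m
           | none => 0)))
      = pvP L idx col := by
  set column := L.map (fun l => PySem.List.pyGetD l col 0) with hcol
  cases hmax : PySem.List.max? column (fun x => x) with
  | none =>
      have := (PySem.List.max?_eq_none_iff _ _).mp hmax
      rw [hcol] at this
      simp at this
      exact absurd this hL
  | some m =>
      show decide ((List.map (fun l => PySem.List.pyGetD l col 0) L)[idx]'(by simpa using hidx) = m)
        = pvP L idx col
      have hmem := PySem.List.max?_mem hmax
      have hub : ∀ y ∈ column, y ≤ m := fun y hy => PySem.List.max?_isMax hmax y hy
      have hv : column[idx]'(by simpa [hcol] using hidx) = PySem.List.pyGetD (L[idx]) col 0 := by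
        simp [hcol]
      unfold pvP
      rw [List.getD_eq_getElem L [] hidx]
      rw [hv, decide_eq_decide]
      constructor
      · intro he l hl
        have : PySem.List.pyGetD l col 0 ∈ column := by
          rw [hcol]; exact List.mem_map_of_mem hl
        have := hub _ this
        omega
      · intro hall
        have h1 : m ≤ PySem.List.pyGetD (L[idx]) col 0 := by
          obtain ⟨l, hl, rfl⟩ := List.mem_map.mp (hcol ▸ hmem)
          exact hall l hl
        have h2 : PySem.List.pyGetD (L[idx]) col 0 ≤ m := by
          apply hub
          rw [hcol]
          exact List.mem_map_of_mem (List.getElem_mem hidx)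
        omega

-- one step of B's column fold, on counts of the shape map g (range n)
theorem pv_step_on_map (L : List (List Int)) (hL : L ≠ []) (g : Nat → Int) (col : Int) :
    (let column := L.map (fun l => PySem.List.pyGetD l col 0)
     let m := match PySem.List.max? column (fun x => x) with
              | some m => m
              | none => 0
     (((List.range L.length).map g).zip column).map (fun cv => cv.1 + (if cv.2 = m then 1 else 0)))
      = (List.range L.length).map (fun idx => g idx + (if pvP L idx col then 1 else 0)) := by
  apply List.ext_getElem
  · simp
  · intro i h1 h2
    simp only [List.getElem_map, List.getElem_zip, List.getElem_range]
    have hi : i < L.length := by simpa using h2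
    rw [← pv_max_char L hL col i hi]
    simp

-- B's fold over an arbitrary column list
theorem pv_fold_B (L : List (List Int)) (hL : L ≠ []) (xs : List Int) (g : Nat → Int) :
    (xs.foldl
      (fun counts col =>
        let column := L.map (fun l => PySem.List.pyGetD l col 0)
        let m := match PySem.List.max? column (fun x => x) with
                 | some m => m
                 | none => 0
        (counts.zip column).map (fun cv => cv.1 + (if cv.2 = m then 1 else 0)))
      ((List.range L.length).map g))
      = (List.range L.length).map (fun idx => g idx + (xs.countP (fun col => pvP L idx col) : Int)) := by
  induction xs generalizing g with
  | nil => simp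
  | cons x t ih =>
      rw [List.foldl_cons]
      rw [pv_step_on_map L hL g x]
      rw [ih (fun idx => g idx + (if pvP L idx x then 1 else 0))]
      apply List.map_congr_left
      intro idx _
      rw [List.countP_cons]
      push_cast
      split_ifs <;> ring

-- ===== VERDICT (by name: the statement is the Claim_ definition above) =====
theorem get_count_list_spec : Claim_equal_get_count_list := by
  intro L _
  unfold Spec_get_count_list
  by_cases hL : L = []
  · subst hL
    simp [get_count_list, get_count_list_alt, PySem.List.pyRange_one_eq_nil]
  · -- A side
    have hn : 0 < L.length := List.length_pos_iff.mpr hL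
    unfold get_count_list
    rw [pv_fold_rot]
    have hlen : (PySem.List.pyRange 0 (PySem.List.len L) 1).length = L.length := by
      simp [PySem.List.length_pyRange_one]
    rw [hlen]
    -- B side
    have hMB := pv_minB L hL
    set M : Int := (match PySem.List.min? (L.map (fun l => (l.length : Int))) (fun x => x) with
                    | some m => m | none => 0) with hMdef
    unfold get_count_list_alt
    rw [if_neg hL]
    have hrepl : List.replicate L.length (0 : Int) = (List.range L.length).map (fun _ => (0:Int)) := by
      simp
    rw [← hMdef, hrepl, pv_fold_B L hL]
    apply List.map_congr_left
    intro c hc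
    have hcl : c < L.length := List.mem_range.mp hc
    rw [pv_iterate_rot L c (le_of_lt hcl)]
    rw [pv_count_greater_eq L c hcl M hMB]
    rw [zero_add]
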